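-- pv_equiv track=rewrite | github.com/FHTMitchell/music-league-scrape | src/names.py | build_short_name_map
-- ===== SOURCE A (Python) =====
-- from collections.abc import Iterable
--
-- def build_short_name_map(names: Iterable[str]) -> dict[str, str]:
--     """Return ``{full_name: short_name}`` for every multi-word name in ``names``.
--
--     Names without a space are not included in the map (callers should leave
--     those untouched). Within a first-name group, the last-name prefix is
--     grown one character at a time until every short form is distinct.
--     """
--     by_first: dict[str, list[tuple[str, str]]] = {}
--     for full in {n for n in names if _looks_like_real_name(n)}:
--         first, *rest = full.split(" ")
--         last = " ".join(rest)
--         by_first.setdefault(first, []).append((full, last))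
--
--     short: dict[str, str] = {}
--     for first, entries in by_first.items():
--         prefix_len = _min_unique_prefix(last for _, last in entries)
--         for full, last in entries:
--             short[full] = f"{first} {last[:prefix_len]}"
--     return short
--
-- def _looks_like_real_name(name: object) -> bool:
--     """A real first+last name has a space and no bracket/punctuation noise.
--
--     Excludes Music League's ``[Left the league]`` placeholder and any other
--     bracketed/templated string the site might use.
--     """
--     if not isinstance(name, str):
--         return False
--     stripped = name.strip()
--     if " " not in stripped:
--         return False
--     if stripped.startswith("[") or stripped.endswith("]"):
--         return False
--     return True
--
-- def _min_unique_prefix(values: Iterable[str]) -> int: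
--     pool = list(values)
--     if len(set(pool)) <= 1:
--         return 1
--     longest = max(len(v) for v in pool)
--     for n in range(1, longest + 1):
--         if len({v[:n] for v in pool}) == len(pool):
--             return n
--     return longest
-- ===== SOURCE B (Python) =====
-- def build_short_name_map(names):
--     """Map each real "First Last..." name to its shortest unique short form.
--
--     Instead of growing the prefix length and re-testing distinctness of the
--     whole group (as A does), the minimal length is computed in closed form:
--     one plus the maximum longest-common-prefix between any two last names
--     in the group.
--     """
--     uniq = list(dict.fromkeys(n for n in names if _is_real_name(n)))
--     groups = {}
--     for full in uniq:
--         first, last = full.split(" ", 1)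
--         groups.setdefault(first, []).append((full, last))
--     out = {}
--     for first, entries in groups.items():
--         plen = 1 + _max_lcp([last for _, last in entries])
--         for full, last in entries:
--             out[full] = first + " " + last[:plen]
--     return out
--
--
-- def _is_real_name(name):
--     if not isinstance(name, str):
--         return False
--     s = name.strip()
--     return " " in s and not s.startswith("[") and not s.endswith("]")
--
--
-- def _max_lcp(lasts):
--     best = 0
--     rest = lasts
--     while rest:
--         head, rest = rest[0], rest[1:]
--         for b in rest:
--             best = max(best, _lcp(head, b))
--     return best
--
--
-- def _lcp(a, b):
--     i = 0
--     while i < len(a) and i < len(b) and a[i] == b[i]: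
--         i += 1
--     return i
-- ===== Notes on version B (the rewrite author's own statement) =====
-- stated objective: alternative
-- what changed: A finds each group's prefix length by growing n and re-testing distinctness of all n-character prefixes with a set; B computes it in closed form as 1 + the maximum longest-common-prefix over pairs of last names (and dedups with an ordered dict.fromkeys pass instead of a set comprehension, splitting each name once with split(' ', 1)).
import Mathlib
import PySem

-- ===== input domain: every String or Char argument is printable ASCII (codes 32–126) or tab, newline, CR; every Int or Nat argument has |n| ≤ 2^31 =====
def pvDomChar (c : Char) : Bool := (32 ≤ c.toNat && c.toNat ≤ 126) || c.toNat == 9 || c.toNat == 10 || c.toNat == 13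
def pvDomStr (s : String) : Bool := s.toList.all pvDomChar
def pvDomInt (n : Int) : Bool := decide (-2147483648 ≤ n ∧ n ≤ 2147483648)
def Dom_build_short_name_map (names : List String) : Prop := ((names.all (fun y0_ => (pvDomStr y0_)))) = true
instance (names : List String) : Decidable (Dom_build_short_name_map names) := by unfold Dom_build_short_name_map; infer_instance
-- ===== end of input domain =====

-- B replaces A's grow-the-prefix-and-retest search by a closed-form answer (1 + max pairwise
-- common-prefix length of the group's last names); objective: alternative algorithm, not speed.

-- ===== PORT A =====
def pvLooksLikeRealName (name : String) : Bool :=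
  let stripped := PySem.Str.strip name
  if !(PySem.Str.isIn " " stripped) then false
  else if PySem.Str.startswith stripped "[" || PySem.Str.endswith stripped "]" then false
  else true

def pvMinUniquePrefix (pool : List String) : Int :=
  if (PySem.Set.ofList pool).length ≤ 1 then 1
  else
    -- max(len(v) for v in pool); pool is nonempty here, so the .getD 0 default is dead code
    let longest : Int := (PySem.List.max? (pool.map (fun v => PySem.Str.len v)) (fun x => x)).getD 0
    match (PySem.List.pyRange 1 (longest + 1)).find?
        (fun n => (PySem.Set.ofList (pool.map (fun v => PySem.Str.slice v none (some n)))).length == pool.length) with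
    | some n => n
    | none => longest

-- loop body of A's first loop: first, *rest = full.split(" "); last = " ".join(rest)
def pvAGroupStep (d : PySem.Dict String (List (String × String))) (full : String) :
    PySem.Dict String (List (String × String)) :=
  let parts := (PySem.Str.split? full " ").getD []   -- sep " " ≠ "" so split? is some
  let first := parts.headD ""                        -- split always returns ≥ 1 part
  let last := PySem.Str.join " " parts.tail
  d.modify first [] (fun v => v ++ [(full, last)])

-- loop body of A's second loop (one first-name group)
def pvAOutStep (sh : PySem.Dict String String) (p : String × List (String × String)) :
    PySem.Dict String String :=
  let prefix_len := pvMinUniquePrefix (p.2.map (fun e => e.2))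
  p.2.foldl
    (fun sh e => sh.insert e.1 (p.1 ++ " " ++ PySem.Str.slice e.2 none (some prefix_len)))
    sh

def build_short_name_map (names : List String) : List (String × String) :=
  let by_first :=
    (PySem.Set.ofList (names.filter (fun n => pvLooksLikeRealName n))).foldl
      pvAGroupStep PySem.Dict.empty
  (by_first.items.foldl pvAOutStep (PySem.Dict.empty : PySem.Dict String String)).items

-- ===== PORT B =====
def pvIsRealName (name : String) : Bool :=
  let s := PySem.Str.strip name
  PySem.Str.isIn " " s && !PySem.Str.startswith s "[" && !PySem.Str.endswith s "]"

-- while i < len(a) and i < len(b) and a[i] == b[i]: i += 1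
def pvLcpGo (a b : List Char) (i : Nat) : Nat :=
  if h1 : i < a.length then
    if h2 : i < b.length then
      if a[i] = b[i] then pvLcpGo a b (i + 1) else i
    else i
  else i
termination_by a.length - i
decreasing_by omega

def pvLcp (a b : String) : Int := (pvLcpGo a.toList b.toList 0 : Int)

-- while rest: head, rest = rest[0], rest[1:]; for b in rest: best = max(best, _lcp(head, b))
def pvMaxLcpGo (best : Int) : List String → Int
  | [] => best
  | head :: rest => pvMaxLcpGo (rest.foldl (fun m b => max m (pvLcp head b)) best) rest

def pvMaxLcp (lasts : List String) : Int := pvMaxLcpGo 0 lasts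

-- loop body of B's grouping loop: first, last = full.split(" ", 1)
def pvBGroupStep (d : PySem.Dict String (List (String × String))) (full : String) :
    PySem.Dict String (List (String × String)) :=
  let parts := (PySem.Str.splitMax? full " " 1).getD []   -- sep " " ≠ "" so splitMax? is some
  let first := parts.headD ""    -- every kept name contains a space, so exactly 2 parts
  let last := parts.tail.headD ""
  d.modify first [] (fun v => v ++ [(full, last)])

-- loop body of B's output loop (one first-name group)
def pvBOutStep (o : PySem.Dict String String) (p : String × List (String × String)) :
    PySem.Dict String String :=
  let plen := 1 + pvMaxLcp (p.2.map (fun e => e.2))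
  p.2.foldl
    (fun o e => o.insert e.1 (p.1 ++ " " ++ PySem.Str.slice e.2 none (some plen)))
    o

def build_short_name_map_alt (names : List String) : List (String × String) :=
  let uniq := PySem.List.dedup (names.filter (fun n => pvIsRealName n))
  let groups := uniq.foldl pvBGroupStep PySem.Dict.empty
  (groups.items.foldl pvBOutStep (PySem.Dict.empty : PySem.Dict String String)).items

-- ===== PRECONDITION & SPEC =====
def Spec_build_short_name_map (names : List String) (out : List (String × String)) : Prop := out = build_short_name_map_alt names
instance (names : List String) (out : List (String × String)) : Decidable (Spec_build_short_name_map names out) := by unfold Spec_build_short_name_map; infer_instance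

-- ===== CLAIM (what is proved, stated in full; the proofs are below) =====
def Claim_equal_build_short_name_map : Prop := ∀ (names : List String), Dom_build_short_name_map names → Spec_build_short_name_map names (build_short_name_map names)

-- ===== LEMMAS AND PROOFS =====

-- proof-only helpers
def pvTW (cs : List Char) : List Char := cs.takeWhile (fun x => x != ' ')
def pvAF (cs : List Char) : List Char := (cs.dropWhile (fun x => x != ' ')).tail
def pvF (full : String) : String := String.ofList (pvTW full.toList)
def pvL (full : String) : String := String.ofList (pvAF full.toList)
def pvBody (d : PySem.Dict String (List (String × String))) (full : String) :
    PySem.Dict String (List (String × String)) :=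
  d.modify (pvF full) [] (fun v => v ++ [(full, pvL full)])
def pvUniq (names : List String) : List String :=
  PySem.Set.ofList (names.filter (fun n => pvIsRealName n))
def pvDict (names : List String) : PySem.Dict String (List (String × String)) :=
  (pvUniq names).foldl pvBody PySem.Dict.empty
def pvLcpN : List Char → List Char → Nat
  | x :: a, y :: b => if x = y then pvLcpN a b + 1 else 0
  | _, _ => 0

lemma pvRealName_eq (n : String) : pvLooksLikeRealName n = pvIsRealName n := by
  unfold pvLooksLikeRealName pvIsRealName
  cases h1 : PySem.Str.isIn " " (PySem.Str.strip n) <;>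
    cases h2 : PySem.Str.startswith (PySem.Str.strip n) "[" <;>
      cases h3 : PySem.Str.endswith (PySem.Str.strip n) "]" <;>
        simp [h1, h2, h3, Bool.and_assoc]

lemma pvSpace_mem {full : String} (h : pvIsRealName full = true) : ' ' ∈ full.toList := by
  unfold pvIsRealName at h
  simp only [Bool.and_eq_true] at h
  have h1 := h.1.1
  rw [PySem.Str.isIn_iff_infix] at h1
  have hsp : ' ' ∈ (PySem.Str.strip full).toList :=
    h1.mem (by rw [show (" " : String).toList = [' '] from by decide]; simp)
  rw [PySem.Str.toList_strip] at hsp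
  have hsub : (PySem.Chars.strip full.toList).Sublist full.toList := by
    unfold PySem.Chars.strip PySem.Chars.rstrip PySem.Chars.lstrip
    have h2 := (List.dropWhile_sublist (l := (full.toList.dropWhile PySem.Chars.isspace).reverse)
      PySem.Chars.isspace).reverse
    rw [List.reverse_reverse] at h2
    exact h2.trans (List.dropWhile_sublist _)
  exact hsub.mem hsp

lemma pvDropWhile_eq_cons {cs : List Char} (h : ' ' ∈ cs) :
    cs.dropWhile (fun x => x != ' ') = ' ' :: pvAF cs := by
  unfold pvAF
  induction cs with
  | nil => simp at h
  | cons x r ih =>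
    by_cases hx : x = ' '
    · subst hx; simp [List.dropWhile_cons]
    · have hr : ' ' ∈ r := by
        rcases List.mem_cons.1 h with h' | h'
        · exact absurd h'.symm hx
        · exact h'
      simp only [List.dropWhile_cons, show (x != ' ') = true from by simp [hx]]
      simp only [if_true]
      exact ih hr

lemma pvReconstruct {cs : List Char} (h : ' ' ∈ cs) : cs = pvTW cs ++ ' ' :: pvAF cs := by
  conv_lhs => rw [← List.takeWhile_append_dropWhile (p := fun x => x != ' ') (l := cs)]
  rw [pvDropWhile_eq_cons h]
  rfl

lemma pvModifyHead_id (l : List (List Char)) : l.modifyHead (fun t => t) = l := by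
  cases l <;> simp

lemma pvSplitOnGo (c : Char) :
    ∀ (fuel : Nat) (l cur : List Char) (accs : List (List Char)), l.length < fuel →
      PySem.Chars.splitOn.go [c] fuel l cur accs =
        accs.reverse ++ (List.splitOn c l).modifyHead (fun t => cur.reverse ++ t) := by
  intro fuel
  induction fuel with
  | zero => intro l cur accs h; omega
  | succ k ih =>
    intro l cur accs h
    cases l with
    | nil =>
      simp [PySem.Chars.splitOn.go, List.splitOn]
    | cons x rest =>
      rw [PySem.Chars.splitOn.go]
      by_cases hx : c = x
      · subst hx
        have hpre : [c].isPrefixOf (c :: rest) = true := by simp [List.isPrefixOf]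
        rw [if_pos hpre]
        have hlen : rest.length < k := by simpa using h
        rw [show List.drop [c].length (c :: rest) = rest from by simp]
        rw [ih rest [] (cur.reverse :: accs) hlen]
        rw [show (List.splitOn c (c :: rest)) = [] :: List.splitOn c rest from by
          simp [List.splitOn, List.splitOnP_cons]]
        simp [pvModifyHead_id]
      · have hpre : [c].isPrefixOf (x :: rest) = false := by
          simp [List.isPrefixOf]
          first | exact hx | exact fun hh => hx hh.symm
        rw [if_neg (by simp [hpre])]
        have hlen : rest.length < k := by simpa using h
        rw [ih rest (x :: cur) accs hlen]
        rw [show (List.splitOn c (x :: rest)) = (List.splitOn c rest).modifyHead (fun t => x :: t) from by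
          simp [List.splitOn, List.splitOnP_cons, beq_iff_eq]
          intro hxc; exact absurd hxc.symm hx]
        congr 1
        cases hsp : List.splitOn c rest with
        | nil => simp
        | cons hh tt => simp

lemma pvSplitOn_eq (c : Char) (cs : List Char) :
    PySem.Chars.splitOn cs [c] = List.splitOn c cs := by
  unfold PySem.Chars.splitOn
  rw [pvSplitOnGo c (cs.length + 1) cs [] [] (by omega)]
  simp [pvModifyHead_id]

lemma pvSplitOnP_ne_nil (p : Char → Bool) (cs : List Char) : List.splitOnP p cs ≠ [] := by
  induction cs with
  | nil => simp [List.splitOnP_nil]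
  | cons x r ih =>
    rw [List.splitOnP_cons]
    split
    · simp
    · cases h : List.splitOnP p r with
      | nil => exact absurd h ih
      | cons a b => simp

lemma pvSplit_headD (cs : List Char) :
    (List.splitOn ' ' cs).headD [] = pvTW cs := by
  unfold pvTW
  induction cs with
  | nil => simp [List.splitOn]
  | cons x r ih =>
    by_cases hx : x = ' '
    · subst hx; simp [List.splitOn, List.splitOnP_cons]
    · rw [show List.splitOn ' ' (x :: r) = (List.splitOn ' ' r).modifyHead (fun t => x :: t) from by
        simp [List.splitOn, List.splitOnP_cons, beq_iff_eq]
        intro hxc; exact absurd hxc hx]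
      rw [List.takeWhile_cons]
      rw [show (x != ' ') = true from by simp [hx]]
      simp only [if_true]
      cases hsp : List.splitOn ' ' r with
      | nil => exact absurd hsp (pvSplitOnP_ne_nil _ r)
      | cons a b =>
        rw [hsp] at ih
        simp at ih ⊢
        rw [ih]

lemma pvSplit_tail {cs : List Char} (h : ' ' ∈ cs) :
    (List.splitOn ' ' cs).tail = List.splitOn ' ' (pvAF cs) := by
  unfold pvAF
  induction cs with
  | nil => simp at h
  | cons x r ih =>
    by_cases hx : x = ' '
    · subst hx
      simp [List.splitOn, List.splitOnP_cons, List.dropWhile_cons]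
    · have hr : ' ' ∈ r := by
        rcases List.mem_cons.1 h with h' | h'
        · exact absurd h'.symm hx
        · exact h'
      rw [show List.splitOn ' ' (x :: r) = (List.splitOn ' ' r).modifyHead (fun t => x :: t) from by
        simp [List.splitOn, List.splitOnP_cons, beq_iff_eq]
        intro hxc; exact absurd hxc hx]
      rw [List.dropWhile_cons]
      rw [show (x != ' ') = true from by simp [hx]]
      simp only [if_true]
      rw [← ih hr]
      cases hsp : List.splitOn ' ' r with
      | nil => exact absurd hsp (pvSplitOnP_ne_nil _ r)
      | cons a b => simp

lemma pvSplitOnMaxGo_zero (c : Char) (fuel : Nat) (l cur : List Char) (accs : List (List Char)) :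
    PySem.Chars.splitOnMax.go [c] fuel 0 l cur accs = accs.reverse ++ [cur.reverse ++ l] := by
  cases fuel with
  | zero => simp [PySem.Chars.splitOnMax.go]
  | succ k =>
    cases l with
    | nil => simp [PySem.Chars.splitOnMax.go]
    | cons x rest => simp [PySem.Chars.splitOnMax.go]

lemma pvSplitOnMaxGo_one (c : Char) :
    ∀ (fuel : Nat) (l cur : List Char) (accs : List (List Char)), l.length < fuel →
      PySem.Chars.splitOnMax.go [c] fuel 1 l cur accs =
        accs.reverse ++ (if c ∈ l then
          [cur.reverse ++ l.takeWhile (fun x => x != c), (l.dropWhile (fun x => x != c)).tail]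
        else [cur.reverse ++ l]) := by
  intro fuel
  induction fuel with
  | zero => intro l cur accs h; omega
  | succ k ih =>
    intro l cur accs h
    cases l with
    | nil => simp [PySem.Chars.splitOnMax.go]
    | cons x rest =>
      rw [PySem.Chars.splitOnMax.go]
      by_cases hx : c = x
      · subst hx
        have hpre : [c].isPrefixOf (c :: rest) = true := by simp [List.isPrefixOf]
        rw [if_neg (by omega), if_pos hpre]
        rw [show List.drop [c].length (c :: rest) = rest from by simp]
        rw [pvSplitOnMaxGo_zero]
        simp [List.takeWhile_cons, List.dropWhile_cons]
      · have hpre : [c].isPrefixOf (x :: rest) = false := by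
          simp [List.isPrefixOf]
          first | exact hx | exact fun hh => hx hh.symm
        rw [if_neg (by omega), if_neg (by simp [hpre])]
        have hlen : rest.length < k := by simpa using h
        rw [ih rest (x :: cur) accs hlen]
        have hxc : (x != c) = true := by
          simp
          first | exact fun hh => hx hh.symm | exact hx
        by_cases hmem : c ∈ rest
        · rw [if_pos hmem, if_pos (by simp [List.mem_cons]; right; exact hmem)]
          rw [List.takeWhile_cons, List.dropWhile_cons, hxc]
          simp
        · rw [if_neg hmem, if_neg (by
            intro hh
            rcases List.mem_cons.1 hh with h' | h'
            · exact hx h'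
            · exact hmem h')]
          simp

lemma pvSplitOnMax_eq {cs : List Char} (h : ' ' ∈ cs) :
    PySem.Chars.splitOnMax cs [' '] 1 = [pvTW cs, pvAF cs] := by
  unfold PySem.Chars.splitOnMax
  rw [if_neg (by omega)]
  rw [show (1 : Int).toNat = 1 from rfl]
  rw [pvSplitOnMaxGo_one ' ' (cs.length + 1) cs [] [] (by omega)]
  rw [if_pos h]
  rfl

lemma pvSpaceToList : (" " : String).toList = [' '] := by decide

lemma pvAbody_eq (d : PySem.Dict String (List (String × String))) {full : String}
    (h : pvIsRealName full = true) : pvAGroupStep d full = pvBody d full := by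
  have hmem : ' ' ∈ full.toList := pvSpace_mem h
  have hsplit : ∃ parts, PySem.Str.split? full " " = some parts ∧
      parts.map String.toList = List.splitOn ' ' full.toList := by
    have hm := PySem.Str.split?_map full " "
    rw [pvSpaceToList] at hm
    unfold PySem.Chars.split? at hm
    rw [if_neg (by simp)] at hm
    rw [pvSplitOn_eq] at hm
    rcases Option.map_eq_some_iff.1 hm with ⟨parts, hp, hmap⟩
    exact ⟨parts, hp, hmap⟩
  rcases hsplit with ⟨parts, hp, hmap⟩
  unfold pvAGroupStep pvBody
  rw [hp]
  simp only [Option.getD_some]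
  have hne : parts ≠ [] := by
    intro hnil
    rw [hnil] at hmap
    exact pvSplitOnP_ne_nil _ full.toList hmap.symm
  have hfirst : parts.headD "" = pvF full := by
    rw [← String.toList_inj]
    have hh : (parts.headD "").toList = (parts.map String.toList).headD [] := by
      cases parts with
      | nil => simp
      | cons a b => simp
    rw [hh, hmap, pvSplit_headD]
    unfold pvF
    simp
  have hlast : PySem.Str.join " " parts.tail = pvL full := by
    rw [← String.toList_inj]
    rw [PySem.Str.toList_join, pvSpaceToList]
    have hh : parts.tail.map String.toList = (parts.map String.toList).tail := by
      cases parts <;> simp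
    rw [hh, hmap, pvSplit_tail hmem]
    unfold PySem.Chars.join pvL
    rw [List.intercalate_splitOn]
    simp
  rw [hfirst, hlast]

lemma pvBbody_eq (d : PySem.Dict String (List (String × String))) {full : String}
    (h : pvIsRealName full = true) : pvBGroupStep d full = pvBody d full := by
  have hmem : ' ' ∈ full.toList := pvSpace_mem h
  have hsplit : ∃ parts, PySem.Str.splitMax? full " " 1 = some parts ∧
      parts.map String.toList = [pvTW full.toList, pvAF full.toList] := by
    have hm := PySem.Str.splitMax?_map full " " 1
    rw [pvSpaceToList] at hm
    unfold PySem.Chars.splitMax? at hm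
    rw [if_neg (by simp)] at hm
    rw [pvSplitOnMax_eq hmem] at hm
    rcases Option.map_eq_some_iff.1 hm with ⟨parts, hp, hmap⟩
    exact ⟨parts, hp, hmap⟩
  rcases hsplit with ⟨parts, hp, hmap⟩
  obtain ⟨s1, s2, rfl⟩ : ∃ s1 s2, parts = [s1, s2] := by
    cases parts with
    | nil => simp at hmap
    | cons a t =>
      cases t with
      | nil => simp at hmap
      | cons b t2 =>
        cases t2 with
        | nil => exact ⟨a, b, rfl⟩
        | cons c t3 => simp at hmap
  have hmap' : s1.toList = pvTW full.toList ∧ s2.toList = pvAF full.toList := by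
    simpa using hmap
  clear hmap
  have hmap := hmap' 
  unfold pvBGroupStep pvBody
  rw [hp]
  simp only [Option.getD_some, List.headD_cons, List.tail_cons]
  have hfirst : s1 = pvF full := by
    rw [← String.toList_inj, hmap.1]; unfold pvF; simp
  have hlast : s2 = pvL full := by
    rw [← String.toList_inj, hmap.2]; unfold pvL; simp
  rw [hfirst, hlast]

lemma pvLcpGo_eq (a b : List Char) (i : Nat) :
    pvLcpGo a b i = i + pvLcpN (a.drop i) (b.drop i) := by
  fun_induction pvLcpGo a b i with
  | case1 i h1 h2 heq ih =>
    rw [ih]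
    rw [List.drop_eq_getElem_cons h1, List.drop_eq_getElem_cons h2]
    rw [show pvLcpN (a[i] :: a.drop (i+1)) (b[i] :: b.drop (i+1)) =
        pvLcpN (a.drop (i+1)) (b.drop (i+1)) + 1 from by simp [pvLcpN, heq]]
    omega
  | case2 i h1 h2 hne =>
    rw [List.drop_eq_getElem_cons h1, List.drop_eq_getElem_cons h2]
    rw [show pvLcpN (a[i] :: a.drop (i+1)) (b[i] :: b.drop (i+1)) = 0 from by simp [pvLcpN, hne]]
    omega
  | case3 i h1 h2 =>
    rw [List.drop_of_length_le (show b.length ≤ i by omega)]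
    rw [show pvLcpN (a.drop i) ([] : List Char) = 0 from by cases a.drop i <;> simp [pvLcpN]]
    omega
  | case4 i h1 =>
    rw [List.drop_of_length_le (show a.length ≤ i by omega)]
    simp [pvLcpN]

lemma pvLcp_eq (a b : String) : pvLcp a b = (pvLcpN a.toList b.toList : Int) := by
  unfold pvLcp
  rw [pvLcpGo_eq]
  simp

lemma pvLcpN_comm (a b : List Char) : pvLcpN a b = pvLcpN b a := by
  induction a generalizing b with
  | nil => cases b <;> simp [pvLcpN]
  | cons x a' ih =>
    cases b with
    | nil => simp [pvLcpN]
    | cons y b' =>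
      by_cases hxy : x = y
      · subst hxy; simp [pvLcpN, ih]
      · simp [pvLcpN, hxy, Ne.symm hxy]

lemma pvLcpN_take_of_le {a b : List Char} {k : Nat} (h : k ≤ pvLcpN a b) :
    a.take k = b.take k := by
  induction a generalizing b k with
  | nil =>
    cases b <;> simp [pvLcpN] at h <;> simp [h]
  | cons x a' ih =>
    cases b with
    | nil => simp [pvLcpN] at h; simp [h]
    | cons y b' =>
      cases k with
      | zero => simp
      | succ k' =>
        by_cases hxy : x = y
        · subst hxy
          simp [pvLcpN] at h
          simp [List.take_succ_cons, ih (by omega : k' ≤ pvLcpN a' b')]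
        · simp [pvLcpN, hxy] at h

lemma pvLcpN_le_of_take_eq {a b : List Char} {k : Nat} (hne : a ≠ b)
    (h : a.take k = b.take k) : k ≤ pvLcpN a b := by
  induction a generalizing b k with
  | nil =>
    cases b with
    | nil => exact absurd rfl hne
    | cons y b' =>
      simp only [List.take_nil] at h
      rcases List.take_eq_nil_iff.1 h.symm with h' | h'
      · subst h'; simp
      · simp at h'
  | cons x a' ih =>
    cases b with
    | nil =>
      simp only [List.take_nil] at h
      rcases List.take_eq_nil_iff.1 h with h' | h'
      · subst h'; simp
      · simp at h'
    | cons y b' =>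
      cases k with
      | zero => omega
      | succ k' =>
        simp only [List.take_succ_cons, List.cons.injEq] at h
        obtain ⟨rfl, h2⟩ := h
        have hab : a' ≠ b' := by intro hh; exact hne (by rw [hh])
        have := ih hab h2
        simp [pvLcpN]
        omega

lemma pvLcpN_lt_max {a b : List Char} (hne : a ≠ b) :
    pvLcpN a b < max a.length b.length := by
  induction a generalizing b with
  | nil =>
    cases b with
    | nil => exact absurd rfl hne
    | cons y b' => simp [pvLcpN]
  | cons x a' ih =>
    cases b with
    | nil => simp [pvLcpN]
    | cons y b' =>
      by_cases hxy : x = y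
      · subst hxy
        have hab : a' ≠ b' := by intro hh; exact hne (by rw [hh])
        have := ih hab
        simp [pvLcpN]
        omega
      · simp only [pvLcpN, if_neg hxy, List.length_cons]
        omega

lemma pvMaxLcpGo_le (l : List String) (best : Int) : best ≤ pvMaxLcpGo best l := by
  induction l generalizing best with
  | nil => simp [pvMaxLcpGo]
  | cons head rest ih =>
    calc best ≤ rest.foldl (fun m b => max m (pvLcp head b)) best :=
          (PySem.List.le_foldl_max_int rest (fun b => pvLcp head b) best).1
      _ ≤ _ := ih _

lemma pvMaxLcpGo_pairwise (l : List String) (best : Int) :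
    l.Pairwise (fun a b => pvLcp a b ≤ pvMaxLcpGo best l) := by
  induction l generalizing best with
  | nil => exact List.Pairwise.nil
  | cons head rest ih =>
    refine List.Pairwise.cons ?_ (ih _)
    intro b hb
    calc pvLcp head b ≤ rest.foldl (fun m x => max m (pvLcp head x)) best :=
          (PySem.List.le_foldl_max_int rest (fun x => pvLcp head x) best).2 b hb
      _ ≤ _ := pvMaxLcpGo_le _ _

lemma pvFoldMax_attain (f : String → Int) (l : List String) :
    ∀ best, l.foldl (fun m b => max m (f b)) best = best ∨
      ∃ b ∈ l, l.foldl (fun m b => max m (f b)) best = f b := by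
  induction l with
  | nil => intro best; left; rfl
  | cons x r ih =>
    intro best
    simp only [List.foldl_cons]
    rcases ih (max best (f x)) with h | ⟨b, hb, heq⟩
    · rw [h]
      rcases max_choice best (f x) with h' | h'
      · left; exact h'
      · right; exact ⟨x, by simp, h'⟩
    · right; exact ⟨b, by simp [hb], heq⟩

lemma pvMaxLcpGo_attain (l : List String) (best : Int) :
    pvMaxLcpGo best l = best ∨ ∃ a b, [a, b].Sublist l ∧ pvMaxLcpGo best l = pvLcp a b := by
  induction l generalizing best with
  | nil => left; rfl
  | cons head rest ih =>
    rw [show pvMaxLcpGo best (head :: rest) =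
        pvMaxLcpGo (rest.foldl (fun m b => max m (pvLcp head b)) best) rest from rfl]
    rcases ih (rest.foldl (fun m b => max m (pvLcp head b)) best) with h | ⟨a, b, hsub, heq⟩
    · rw [h]
      rcases pvFoldMax_attain (fun b => pvLcp head b) rest best with h' | ⟨b, hb, heq⟩
      · left; exact h'
      · right
        exact ⟨head, b, List.cons_sublist_cons.2 (List.singleton_sublist.2 hb), heq⟩
    · right
      exact ⟨a, b, hsub.cons head, heq⟩

lemma pvSetLen_iff {α : Type} [BEq α] [LawfulBEq α] (xs : List α) :
    (PySem.Set.ofList xs).length = xs.length ↔ xs.Nodup := by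
  induction xs using List.reverseRecOn with
  | nil => simp [PySem.Set.ofList]
  | append_singleton xs x ih =>
    rw [PySem.Set.ofList_append_singleton, PySem.Set.add_eq_ite]
    have hnd : (xs ++ [x]).Nodup ↔ xs.Nodup ∧ x ∉ xs := by
      constructor
      · intro hh
        have h1 := hh.sublist (List.sublist_append_left xs [x])
        refine ⟨h1, ?_⟩
        intro hxm
        have := List.disjoint_of_nodup_append hh
        exact this hxm (by simp)
      · intro ⟨h1, h2⟩
        exact List.Nodup.append h1 (by simp) (by
          intro a ha hb
          simp at hb
          subst hb
          exact h2 ha)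
    by_cases hmem : x ∈ PySem.Set.ofList xs
    · rw [if_pos hmem]
      have hx : x ∈ xs := (PySem.Set.mem_ofList xs x).1 hmem
      have hle := PySem.Set.length_ofList_le xs
      simp only [List.length_append, List.length_cons, List.length_nil]
      constructor
      · intro hlen; omega
      · intro hh; exact absurd hx (hnd.1 hh).2
    · rw [if_neg hmem]
      have hx : x ∉ xs := fun hh => hmem ((PySem.Set.mem_ofList xs x).2 hh)
      simp only [List.length_append, List.length_cons, List.length_nil]
      rw [hnd]
      constructor
      · intro hh
        exact ⟨ih.1 (by omega), hx⟩
      · intro hh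
        have := ih.2 hh.1
        omega

lemma pvFindRange (p : Int → Bool) (t b : Int) (htb : t < b) (hpt : p t = true) :
    ∀ (k : Nat) (a : Int), (t - a).toNat = k → a ≤ t →
      (∀ n, a ≤ n → n < t → p n = false) →
      (PySem.List.pyRange a b).find? p = some t := by
  intro k
  induction k with
  | zero =>
    intro a hk hat _
    have : a = t := by omega
    subst this
    rw [PySem.List.pyRange_one_cons (by omega)]
    rw [List.find?_cons_of_pos hpt]
  | succ k ih =>
    intro a hk hat hlt
    have halt : a < t := by omega
    rw [PySem.List.pyRange_one_cons (by omega)]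
    rw [List.find?_cons_of_neg (by rw [hlt a le_rfl halt]; simp)]
    exact ih (a + 1) (by omega) (by omega) (fun n h1 h2 => hlt n (by omega) h2)

lemma pvPrefix_eq {lasts : List String} (h : lasts.Nodup) :
    pvMinUniquePrefix lasts = 1 + pvMaxLcp lasts := by
  rcases lasts with _ | ⟨a, _ | ⟨b, rest⟩⟩
  · unfold pvMinUniquePrefix pvMaxLcp pvMaxLcpGo
    simp [PySem.Set.ofList]
  · unfold pvMinUniquePrefix
    rw [PySem.Set.ofList_eq_self_of_nodup _ h]
    simp [pvMaxLcp, pvMaxLcpGo]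
  · have hab : a ≠ b := by
      intro hh; subst hh; simp [List.nodup_cons] at h
    unfold pvMinUniquePrefix
    rw [PySem.Set.ofList_eq_self_of_nodup _ h]
    rw [if_neg (by simp)]
    simp only []
    set pool : List String := a :: b :: rest with hpool
    set M : Int := pvMaxLcp pool with hMdef
    have hMgo : pvMaxLcpGo 0 pool = M := by rw [hMdef]; rfl
    have hM0 : 0 ≤ M := by rw [← hMgo]; exact pvMaxLcpGo_le pool 0
    have hpairwise : pool.Pairwise (fun x y => pvLcp x y ≤ M) := by
      rw [← hMgo]; exact pvMaxLcpGo_pairwise pool 0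
    have hsymm : Symmetric (fun x y : String => pvLcp x y ≤ M) := by
      intro x y hxy
      unfold pvLcp at *
      rw [pvLcpGo_eq] at *
      simp only [List.drop_zero] at *
      rw [pvLcpN_comm]
      exact hxy
    have hforall : ∀ x ∈ pool, ∀ y ∈ pool, x ≠ y → pvLcp x y ≤ M :=
      fun x hx y hy hxy => (hpairwise.forall hsymm) hx hy hxy
    have hex : ∃ x y : String, x ∈ pool ∧ y ∈ pool ∧ x ≠ y ∧
        M < (max x.toList.length y.toList.length : Int) := by
      rcases pvMaxLcpGo_attain pool 0 with h0 | ⟨x, y, hsub, heq⟩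
      · refine ⟨a, b, by simp [hpool], by simp [hpool], hab, ?_⟩
        rw [← hMgo, h0]
        have hne : a.toList ≠ b.toList := fun hh => hab (String.toList_inj.1 hh)
        have := pvLcpN_lt_max hne
        push_cast
        omega
      · have hnd2 : [x, y].Nodup := h.sublist hsub
        have hxy : x ≠ y := by simp at hnd2; exact hnd2
        refine ⟨x, y, hsub.subset (by simp), hsub.subset (by simp), hxy, ?_⟩
        have hne : x.toList ≠ y.toList := fun hh => hxy (String.toList_inj.1 hh)
        have hlt := pvLcpN_lt_max hne
        rw [← hMgo, heq, pvLcp_eq]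
        push_cast
        omega
    obtain ⟨Lg, hLg⟩ : ∃ Lg, PySem.List.max? (pool.map (fun v => PySem.Str.len v))
        (fun x => x) = some Lg := by
      cases hmm : PySem.List.max? (pool.map (fun v => PySem.Str.len v)) (fun x => x) with
      | none =>
        have := (PySem.List.max?_eq_none_iff _ _).1 hmm
        simp [hpool] at this
      | some Lg => exact ⟨Lg, rfl⟩
    have hLgB : ∀ v ∈ pool, (v.toList.length : Int) ≤ Lg := by
      intro v hv
      have := PySem.List.max?_isMax hLg (PySem.Str.len v) (List.mem_map_of_mem hv)
      rw [PySem.Str.len_eq] at this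
      exact this
    have hMLg : M + 1 ≤ Lg := by
      rcases hex with ⟨x, y, hx, hy, _, hlt⟩
      have hx' := hLgB x hx
      have hy' := hLgB y hy
      have hmx : (max x.toList.length y.toList.length : Int) ≤ Lg := by
        push_cast
        exact max_le hx' hy'
      omega
    have hq_nodup : ∀ n : Int,
        ((PySem.Set.ofList (pool.map (fun v => PySem.Str.slice v none (some n)))).length
          == pool.length) = true ↔
        (pool.map (fun v => PySem.Str.slice v none (some n))).Nodup := by
      intro n
      rw [beq_iff_eq]
      rw [show pool.length = (pool.map (fun v => PySem.Str.slice v none (some n))).length from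
        by simp]
      exact pvSetLen_iff _
    have hslice : ∀ (n : Int), 0 ≤ n → ∀ v : String,
        (PySem.Str.slice v none (some n)).toList = v.toList.take n.toNat := by
      intro n hn v
      rw [PySem.Str.toList_slice, PySem.Chars.slice_eq_listSlice, PySem.List.slice_to _ hn]
    have hqt : ((PySem.Set.ofList (pool.map (fun v =>
        PySem.Str.slice v none (some (M + 1))))).length == pool.length) = true := by
      rw [hq_nodup]
      rw [List.nodup_map_iff_inj_on h]
      intro x hx y hy heq
      by_contra hxy
      have hne : x.toList ≠ y.toList := fun hh => hxy (String.toList_inj.1 hh)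
      have htake := congrArg String.toList heq
      rw [hslice _ (by omega) x, hslice _ (by omega) y] at htake
      have hlcp := pvLcpN_le_of_take_eq hne htake
      have hb := hforall x hx y hy hxy
      rw [pvLcp_eq] at hb
      omega
    have hqf : ∀ n : Int, 1 ≤ n → n < M + 1 →
        ((PySem.Set.ofList (pool.map (fun v =>
          PySem.Str.slice v none (some n)))).length == pool.length) = false := by
      intro n h1 h2
      have hM1 : 1 ≤ M := by omega
      rcases pvMaxLcpGo_attain pool 0 with h0 | ⟨x, y, hsub, heq⟩
      · rw [hMgo] at h0; omega
      · have hnd2 : [x, y].Nodup := h.sublist hsub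
        have hxy : x ≠ y := by simp at hnd2; exact hnd2
        have hxp : x ∈ pool := hsub.subset (by simp)
        have hyp : y ∈ pool := hsub.subset (by simp)
        have hMlcp : (pvLcpN x.toList y.toList : Int) = M := by
          rw [← hMgo, heq, pvLcp_eq]
        have htake : x.toList.take n.toNat = y.toList.take n.toNat :=
          pvLcpN_take_of_le (by omega)
        have hslices : PySem.Str.slice x none (some n) = PySem.Str.slice y none (some n) := by
          rw [← String.toList_inj, hslice n (by omega) x, hslice n (by omega) y, htake]
        by_contra hqq
        have hqt' : ((PySem.Set.ofList (pool.map (fun v =>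
            PySem.Str.slice v none (some n)))).length == pool.length) = true := by
          cases hqn : ((PySem.Set.ofList (pool.map (fun v =>
              PySem.Str.slice v none (some n)))).length == pool.length)
          · exact absurd hqn hqq
          · rfl
        have hnd := (hq_nodup n).1 hqt'
        have := (List.nodup_map_iff_inj_on h).1 hnd x hxp y hyp hslices
        exact hxy this
    have hfind : (PySem.List.pyRange 1 (Lg + 1)).find? (fun n =>
        (PySem.Set.ofList (pool.map (fun v =>
          PySem.Str.slice v none (some n)))).length == pool.length) = some (M + 1) :=
      pvFindRange _ (M + 1) (Lg + 1) (by omega) hqt M.toNat 1 (by omega) (by omega)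
        (fun n hn1 hn2 => hqf n hn1 hn2)
    rw [hLg]
    simp only [Option.getD_some]
    rw [hfind]
    simp only []
    rw [hMdef]
    omega

lemma pvDict_getD (names : List String) (k : String) :
    (pvDict names).getD k [] =
      ((pvUniq names).filter (fun full => pvF full == k)).map (fun full => (full, pvL full)) := by
  unfold pvDict pvBody
  have hmap : ((pvUniq names).foldl
        (fun d full => d.modify (pvF full) [] fun v => v ++ [(full, pvL full)]) PySem.Dict.empty)
      = (((pvUniq names).map (fun full => (pvF full, (full, pvL full)))).foldl
          (fun d p => d.modify p.1 [] fun v => v ++ [p.2]) PySem.Dict.empty) := by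
    rw [List.foldl_map]
  rw [hmap, PySem.Dict.getD_foldl_modify_append]
  simp only [PySem.Dict.getD_empty, List.nil_append]
  rw [List.filter_map, List.map_map]
  rfl

lemma pvDict_keys_nodup (names : List String) : (pvDict names).keys.Nodup := by
  unfold pvDict pvBody
  exact PySem.Dict.nodup_keys_foldl_modify_key (pvUniq names) pvF []
    (fun _ full => fun v => v ++ [(full, pvL full)]) PySem.Dict.empty (by
      simp [PySem.Dict.keys_empty])

lemma pvUniq_nodup (names : List String) : (pvUniq names).Nodup :=
  PySem.Set.nodup_ofList _

lemma pvUniq_valid (names : List String) : ∀ x ∈ pvUniq names, pvIsRealName x = true := by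
  intro x hx
  have := (PySem.Set.mem_ofList _ _).1 hx
  exact (List.mem_filter.1 this).2

lemma pvItems_lasts_nodup (names : List String) :
    ∀ p ∈ (pvDict names).items, ((p.2).map (fun e => e.2)).Nodup := by
  intro p hp
  rw [PySem.Dict.items_eq_map_keys (pvDict names) (pvDict_keys_nodup names) []] at hp
  rcases List.mem_map.1 hp with ⟨k, hk, rfl⟩
  simp only
  rw [pvDict_getD, List.map_map]
  have hfn : ((pvUniq names).filter (fun full => pvF full == k)).Nodup :=
    (pvUniq_nodup names).filter _
  rw [List.nodup_map_iff_inj_on hfn]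
  intro x hx y hy hxy
  have hxmem := List.mem_filter.1 hx
  have hymem := List.mem_filter.1 hy
  have hxk : pvF x = k := by simpa using hxmem.2
  have hyk : pvF y = k := by simpa using hymem.2
  have hxsp : ' ' ∈ x.toList := pvSpace_mem (pvUniq_valid names x hxmem.1)
  have hysp : ' ' ∈ y.toList := pvSpace_mem (pvUniq_valid names y hymem.1)
  have hL : pvL x = pvL y := by simpa using hxy
  rw [← String.toList_inj]
  rw [pvReconstruct hxsp, pvReconstruct hysp]
  have h1 : pvTW x.toList = pvTW y.toList := by
    have : (pvF x).toList = (pvF y).toList := by rw [hxk, hyk]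
    unfold pvF at this
    simpa using this
  have h2 : pvAF x.toList = pvAF y.toList := by
    have : (pvL x).toList = (pvL y).toList := by rw [hL]
    unfold pvL at this
    simpa using this
  rw [h1, h2]

-- ===== VERDICT (by name: the statement is the Claim_ definition above) =====
theorem build_short_name_map_spec : Claim_equal_build_short_name_map := by
  intro names _hdom
  unfold Spec_build_short_name_map build_short_name_map build_short_name_map_alt
  simp only []
  have hfilter : names.filter (fun n => pvLooksLikeRealName n) = names.filter (fun n => pvIsRealName n) :=
    List.filter_congr (fun x _ => by rw [pvRealName_eq])
  have hA : (PySem.Set.ofList (names.filter (fun n => pvLooksLikeRealName n))).foldl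
      pvAGroupStep PySem.Dict.empty = pvDict names := by
    rw [hfilter]
    exact PySem.List.foldl_congr_mem _ _ _ _
      (fun acc x hx => pvAbody_eq acc (pvUniq_valid names x hx))
  have hB : (PySem.List.dedup (names.filter (fun n => pvIsRealName n))).foldl
      pvBGroupStep PySem.Dict.empty = pvDict names := by
    exact PySem.List.foldl_congr_mem _ _ _ _
      (fun acc x hx => pvBbody_eq acc (pvUniq_valid names x hx))
  rw [hA, hB]
  congr 1
  refine PySem.List.foldl_congr_mem _ _ _ _ ?_
  intro acc p hp
  unfold pvAOutStep pvBOutStep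
  rw [pvPrefix_eq (pvItems_lasts_nodup names p hp)]
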